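-- pv_equiv track=rewrite | github.com/lioalexandre-procurementor/easytech-wiki-fr | scripts/extract-skills.py | pick_varying_field
-- ===== SOURCE A (Python) =====
-- def pick_varying_field(levels: list[dict]) -> str:
--     """Return 'SkillEffect' or 'ActivatesChance' — whichever varies across levels."""
--     effects = {l["SkillEffect"] for l in levels}
--     chances = {l["ActivatesChance"] for l in levels}
--     if len(effects) > 1 and len(chances) > 1:
--         # Rare: both vary. Prefer SkillEffect (it's the primary number).
--         return "SkillEffect"
--     if len(chances) > 1:
--         return "ActivatesChance"
--     return "SkillEffect"
-- ===== SOURCE B (Python) =====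
-- def pick_varying_field(levels: list[dict]) -> str:
--     """Return 'SkillEffect' or 'ActivatesChance' — whichever varies across levels."""
--     if not levels:
--         return "SkillEffect"
--     ref_effect = levels[0]["SkillEffect"]
--     ref_chance = levels[0]["ActivatesChance"]
--     effect_varies = False
--     chance_varies = False
--     for l in levels[1:]:
--         if l["SkillEffect"] != ref_effect:
--             effect_varies = True
--         if l["ActivatesChance"] != ref_chance:
--             chance_varies = True
--     if chance_varies and not effect_varies:
--         return "ActivatesChance"
--     return "SkillEffect"
-- ===== Notes on version B (the rewrite author's own statement) =====
-- stated objective: simpler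
-- what changed: Replaces the two set comprehensions (building dedup sets of all field values) with a single pass over the tail that keeps two boolean varies-flags relative to the first level's values.
import Mathlib
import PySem

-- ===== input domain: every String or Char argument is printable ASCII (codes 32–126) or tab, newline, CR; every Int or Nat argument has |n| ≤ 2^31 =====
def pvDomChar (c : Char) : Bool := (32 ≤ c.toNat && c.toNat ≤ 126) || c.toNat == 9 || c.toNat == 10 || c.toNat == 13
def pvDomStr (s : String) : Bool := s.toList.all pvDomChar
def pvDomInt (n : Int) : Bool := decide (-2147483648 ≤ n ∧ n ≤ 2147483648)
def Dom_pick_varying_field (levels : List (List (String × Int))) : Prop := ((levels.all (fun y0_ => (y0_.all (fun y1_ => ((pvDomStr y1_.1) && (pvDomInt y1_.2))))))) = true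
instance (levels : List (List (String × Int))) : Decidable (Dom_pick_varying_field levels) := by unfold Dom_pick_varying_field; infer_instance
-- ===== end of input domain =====

-- B keeps two booleans over one pass instead of building the two value sets; return value only.

-- shared helper: l[k] as first-match association lookup (Python dict access; none = KeyError, excluded by Pre_)
def pvLookup (l : List (String × Int)) (k : String) : Option Int := (PySem.Dict.mk l).get? k

-- ===== PORT A =====
def pick_varying_field (levels : List (List (String × Int))) : String :=
  let effects := PySem.Set.ofList (levels.map (fun l => pvLookup l "SkillEffect"))
  let chances := PySem.Set.ofList (levels.map (fun l => pvLookup l "ActivatesChance"))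
  if 1 < PySem.Set.len effects ∧ 1 < PySem.Set.len chances then "SkillEffect"
  else if 1 < PySem.Set.len chances then "ActivatesChance"
  else "SkillEffect"

-- ===== PORT B =====
def pick_varying_field_alt (levels : List (List (String × Int))) : String :=
  match levels with
  | [] => "SkillEffect"
  | l0 :: rest =>
    let refEffect := pvLookup l0 "SkillEffect"
    let refChance := pvLookup l0 "ActivatesChance"
    let flags := rest.foldl (fun (p : Bool × Bool) l =>
      (p.1 || decide (pvLookup l "SkillEffect" ≠ refEffect),
       p.2 || decide (pvLookup l "ActivatesChance" ≠ refChance))) (false, false)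
    if flags.2 && !flags.1 then "ActivatesChance" else "SkillEffect"

-- ===== PRECONDITION & SPEC =====
-- Pre_: every level dict has both keys (Python A raises KeyError otherwise).
def Pre_pick_varying_field (levels : List (List (String × Int))) : Prop :=
  ∀ l ∈ levels, (pvLookup l "SkillEffect").isSome ∧ (pvLookup l "ActivatesChance").isSome
instance (levels : List (List (String × Int))) : Decidable (Pre_pick_varying_field levels) := by unfold Pre_pick_varying_field; infer_instance
def pvWitness_pick_varying_field : (List (List (String × Int))) :=
  [[("SkillEffect", 3), ("ActivatesChance", 10)], [("SkillEffect", 3), ("ActivatesChance", 20)]]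

def Spec_pick_varying_field (levels : List (List (String × Int))) (out : String) : Prop := out = pick_varying_field_alt levels
instance (levels : List (List (String × Int))) (out : String) : Decidable (Spec_pick_varying_field levels out) := by unfold Spec_pick_varying_field; infer_instance

-- ===== CLAIM (what is proved, stated in full; the proofs are below) =====
def Claim_equal_pick_varying_field : Prop := ∀ (levels : List (List (String × Int))), Dom_pick_varying_field levels → Pre_pick_varying_field levels → Spec_pick_varying_field levels (pick_varying_field levels)

-- ===== LEMMAS AND PROOFS =====

-- B's fold computes the two 'any differs' flags
theorem pvFoldFlags {α : Type} [DecidableEq α] (f g : α → Option Int) (e0 c0 : Option Int)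
    (rest : List α) (a b : Bool) :
    rest.foldl (fun (p : Bool × Bool) l =>
      (p.1 || decide (f l ≠ e0), p.2 || decide (g l ≠ c0))) (a, b)
    = (a || rest.any (fun l => decide (f l ≠ e0)), b || rest.any (fun l => decide (g l ≠ c0))) := by
  induction rest generalizing a b with
  | nil => simp
  | cons x xs ih => rw [List.foldl_cons, ih]; simp [Bool.or_assoc]

-- foldl of Set.add only ever appends to its accumulator
theorem pvFoldlAddPrefix {α : Type} [BEq α] (ys : List α) (s : PySem.Set α) :
    ∃ t, List.foldl PySem.Set.add s ys = s ++ t := by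
  induction ys generalizing s with
  | nil => exact ⟨[], by simp⟩
  | cons y ys ih =>
    rw [List.foldl_cons]
    have hadd : PySem.Set.add s y = s ∨ PySem.Set.add s y = s ++ [y] := by
      unfold PySem.Set.add; split <;> simp
    rcases hadd with h | h <;> rw [h]
    · exact ih s
    · rcases ih (s ++ [y]) with ⟨t, ht⟩
      exact ⟨y :: t, by simpa using ht⟩

-- the set of a nonempty list has more than one element iff some tail element differs from the head
theorem pvSetLenGtOne {α : Type} [BEq α] [LawfulBEq α] (x : α) (ys : List α) :
    1 < PySem.Set.len (PySem.Set.ofList (x :: ys)) ↔ ∃ y ∈ ys, y ≠ x := by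
  have hx : ∃ t, PySem.Set.ofList (x :: ys) = x :: t := by
    rcases pvFoldlAddPrefix ys (PySem.Set.add PySem.Set.empty x) with ⟨t, ht⟩
    exact ⟨t, by simpa [PySem.Set.ofList, PySem.Set.add, PySem.Set.empty, PySem.Set.contains] using ht⟩
  rcases hx with ⟨t, ht⟩
  have hnd := PySem.Set.nodup_ofList (x :: ys)
  rw [ht] at hnd
  constructor
  · intro h
    rw [ht] at h
    simp [PySem.Set.len] at h
    rcases t with _ | ⟨b, t'⟩
    · simp at h
    · have hbx : b ≠ x := by rintro rfl; simp at hnd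
      have hb : b ∈ x :: ys := by
        rw [← PySem.Set.mem_ofList (x :: ys) b, ht]; simp
      rcases List.mem_cons.1 hb with rfl | hb'
      · exact absurd rfl hbx
      · exact ⟨b, hb', hbx⟩
  · rintro ⟨y, hy, hne⟩
    have h2 : y ∈ x :: t := by
      rw [← ht, PySem.Set.mem_ofList]; simp [hy]
    have hyt : y ∈ t := by
      rcases List.mem_cons.1 h2 with rfl | h
      · exact absurd rfl hne
      · exact h
    have := List.length_pos_of_mem hyt
    simp [ht, PySem.Set.len]
    omega

-- ===== VERDICT (by name: the statement is the Claim_ definition above) =====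
theorem pick_varying_field_spec : Claim_equal_pick_varying_field := by
  intro levels _ _
  unfold Spec_pick_varying_field pick_varying_field pick_varying_field_alt
  cases levels with
  | nil => simp [PySem.Set.ofList, PySem.Set.empty, PySem.Set.len]
  | cons l0 rest =>
    dsimp only
    rw [pvFoldFlags]
    simp only [List.map_cons]
    have hE : 1 < PySem.Set.len (PySem.Set.ofList (pvLookup l0 "SkillEffect" :: rest.map (fun l => pvLookup l "SkillEffect")))
        ↔ ∃ l ∈ rest, pvLookup l "SkillEffect" ≠ pvLookup l0 "SkillEffect" :=
      (pvSetLenGtOne (pvLookup l0 "SkillEffect") (rest.map (fun l => pvLookup l "SkillEffect"))).trans (by simp)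
    have hC : 1 < PySem.Set.len (PySem.Set.ofList (pvLookup l0 "ActivatesChance" :: rest.map (fun l => pvLookup l "ActivatesChance")))
        ↔ ∃ l ∈ rest, pvLookup l "ActivatesChance" ≠ pvLookup l0 "ActivatesChance" :=
      (pvSetLenGtOne (pvLookup l0 "ActivatesChance") (rest.map (fun l => pvLookup l "ActivatesChance"))).trans (by simp)
    simp only [hE, hC, Bool.and_eq_true, Bool.not_eq_eq_eq_not, Bool.not_true]
    split_ifs with h1 h2 h3 <;> simp_all <;> tauto
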